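-- pv_equiv track=rewrite | github.com/gness1804/cursor-file-system | src/cfs/sync.py | _normalize_text_for_compare
-- ===== SOURCE A (Python) =====
-- def _normalize_text_for_compare(text: str) -> str:
--     """Normalize text for stable comparisons."""
--     if not text:
--         return ""
--     normalized = text.replace("\r\n", "\n").replace("\r", "\n")
--     lines = [line.rstrip() for line in normalized.split("\n")]
--     while lines and lines[0] == "":
--         lines.pop(0)
--     while lines and lines[-1] == "":
--         lines.pop()
--     return "\n".join(lines)
-- ===== SOURCE B (Python) =====
-- def _normalize_text_for_compare(text: str) -> str:
--     """Normalize text for stable comparisons (single pass over characters)."""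
--     out = []
--     started = False
--     nl = 0
--     ws = []
--     i = 0
--     n = len(text)
--     while i < n:
--         ch = text[i]
--         if ch == '\r':
--             i += 2 if i + 1 < n and text[i + 1] == '\n' else 1
--             ch = '\n'
--         else:
--             i += 1
--         if ch == '\n':
--             nl += 1
--             ws = []
--         elif ch == ' ' or ch == '\t':
--             ws.append(ch)
--         else:
--             if started:
--                 out.append('\n' * nl)
--             out.extend(ws)
--             out.append(ch)
--             started = True
--             nl = 0
--             ws = []
--     return ''.join(out)
-- ===== Notes on version B (the rewrite author's own statement) =====
-- stated objective: alternative
-- what changed: Replaces A's multi-pass pipeline (two substring replaces, split on newline, per-line rstrip, two blank-edge trim loops, join) by a single left-to-right pass over the characters with a small state machine that buffers pending newlines and trailing blanks and only flushes them when the next non-blank character appears.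
import Mathlib
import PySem

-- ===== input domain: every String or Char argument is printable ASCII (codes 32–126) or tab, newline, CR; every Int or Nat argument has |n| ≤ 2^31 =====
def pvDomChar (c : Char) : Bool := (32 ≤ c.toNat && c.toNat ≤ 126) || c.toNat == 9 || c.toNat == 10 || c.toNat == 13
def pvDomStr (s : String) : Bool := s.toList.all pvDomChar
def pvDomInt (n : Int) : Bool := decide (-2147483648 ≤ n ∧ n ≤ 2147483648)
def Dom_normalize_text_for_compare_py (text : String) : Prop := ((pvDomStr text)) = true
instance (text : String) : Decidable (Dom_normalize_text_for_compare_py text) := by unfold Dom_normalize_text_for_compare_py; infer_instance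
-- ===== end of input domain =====

-- B replaces A's replace/split/rstrip/trim/join pipeline by a single left-to-right pass over the
-- characters with a small pending-whitespace state machine (objective: alternative, same O(n) cost).

-- ===== PORT A =====
-- while lines and lines[0] == "": lines.pop(0)
def pvTrimFront : List String → List String
  | [] => []
  | l :: ls => if l = "" then pvTrimFront ls else l :: ls

-- while lines and lines[-1] == "": lines.pop()
def pvTrimBack (ls : List String) : List String :=
  if h : ls ≠ [] ∧ ls.getLast! = "" then pvTrimBack ls.dropLast else ls
termination_by ls.length
decreasing_by
  have : ls.dropLast.length < ls.length := by
    cases ls with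
    | nil => exact absurd rfl h.1
    | cons a t => simp [List.length_dropLast]
  exact this

def normalize_text_for_compare_py (text : String) : String :=
  if text = "" then "" else
    let normalized := PySem.Str.replace (PySem.Str.replace text "\r\n" "\n") "\r" "\n"
    let lines := ((PySem.Str.split? normalized "\n").getD []).map PySem.Str.rstrip
    PySem.Str.join "\n" (pvTrimBack (pvTrimFront lines))

-- ===== PORT B =====
-- the single-pass machine of Source B: state = (started, nl = pending newlines, ws = pending blanks, out)
def pvBGo : List Char → Bool → Nat → List Char → List Char → List Char
  | [], _, _, _, out => out
  | '\r' :: '\n' :: t, st, nl, _, out => pvBGo t st (nl + 1) [] out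
  | '\r' :: t, st, nl, _, out => pvBGo t st (nl + 1) [] out
  | '\n' :: t, st, nl, _, out => pvBGo t st (nl + 1) [] out
  | c :: t, st, nl, ws, out =>
      if c = ' ' ∨ c = '\t' then pvBGo t st nl (ws ++ [c]) out
      else pvBGo t true 0 [] (out ++ (if st then List.replicate nl '\n' else []) ++ ws ++ [c])

def normalize_text_for_compare_py_alt (text : String) : String :=
  String.ofList (pvBGo text.toList false 0 [] [])

-- ===== PRECONDITION & SPEC =====
def Spec_normalize_text_for_compare_py (text : String) (out : String) : Prop := out = normalize_text_for_compare_py_alt text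
instance (text : String) (out : String) : Decidable (Spec_normalize_text_for_compare_py text out) := by unfold Spec_normalize_text_for_compare_py; infer_instance

-- ===== CLAIM (what is proved, stated in full; the proofs are below) =====
def Claim_equal_normalize_text_for_compare_py : Prop := ∀ (text : String), Dom_normalize_text_for_compare_py text → Spec_normalize_text_for_compare_py text (normalize_text_for_compare_py text)

-- ===== LEMMAS AND PROOFS =====

-- CR-normalization as a simple recursion
def pvNorm : List Char → List Char
  | [] => []
  | '\r' :: '\n' :: t => '\n' :: pvNorm t
  | '\r' :: t => '\n' :: pvNorm t
  | c :: t => c :: pvNorm t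

-- replace "\r\n" "\n" as a simple recursion
def pvN1 : List Char → List Char
  | [] => []
  | '\r' :: '\n' :: t => '\n' :: pvN1 t
  | c :: t => c :: pvN1 t

-- replace "\r" "\n" as a simple recursion
def pvN2 : List Char → List Char
  | [] => []
  | c :: t => (if c = '\r' then '\n' else c) :: pvN2 t

-- prepend cs to the first block
def pvConsHead (cs : List Char) : List (List Char) → List (List Char)
  | [] => [cs]
  | h :: tl => (cs ++ h) :: tl

-- split on '\n' as a simple recursion
def pvSplit : List Char → List (List Char)
  | [] => [[]]
  | c :: t => if c = '\n' then [] :: pvSplit t else pvConsHead [c] (pvSplit t)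

-- head-recursive version of the back-trim, over char lists
def pvTrimB : List (List Char) → List (List Char)
  | [] => []
  | r :: rs => match pvTrimB rs with
      | [] => if r = [] then [] else [r]
      | l => r :: l

def pvTrimF : List (List Char) → List (List Char)
  | [] => []
  | l :: ls => if l = [] then pvTrimF ls else l :: ls

def pvJoin : List (List Char) → List Char
  | [] => []
  | [x] => x
  | x :: y :: t => x ++ '\n' :: pvJoin (y :: t)

-- machine without the CR cases (runs on pvNorm output)
def pvMGo : List Char → Bool → Nat → List Char → List Char → List Char
  | [], _, _, _, out => out
  | c :: t, st, nl, ws, out =>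
      if c = '\n' then pvMGo t st (nl + 1) [] out
      else if c = ' ' ∨ c = '\t' then pvMGo t st nl (ws ++ [c]) out
      else pvMGo t true 0 [] (out ++ (if st then List.replicate nl '\n' else []) ++ ws ++ [c])

-- line-level machine (inputs already rstripped)
def pvH : Bool → Nat → List (List Char) → List Char
  | _, _, [] => []
  | st, nl, r :: rs =>
      if r = [] then pvH st (nl + 1) rs
      else (if st then List.replicate nl '\n' else []) ++ r ++ pvH true 1 rs

theorem pvBGo_eq_pvMGo_pvNorm (cs : List Char) (st : Bool) (nl : Nat) (ws out : List Char) :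
    pvBGo cs st nl ws out = pvMGo (pvNorm cs) st nl ws out := by
  fun_induction pvBGo cs st nl ws out <;>
    simp_all [pvNorm, pvMGo]

theorem pvSplit_ne_nil (cs : List Char) : pvSplit cs ≠ [] := by
  fun_induction pvSplit cs <;> simp_all [pvConsHead]
  · rename_i t _ h
    cases hq : pvSplit t <;> simp [pvConsHead, hq]

theorem pvChar_eq_of_toNat (c d : Char) (h : c.toNat = d.toNat) : c = d := by
  unfold Char.toNat at h
  exact Char.ext (UInt32.toNat_inj.mp h)

theorem pv_isspace_false (c : Char) (hdom : pvDomChar c = true)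
    (h1 : c ≠ '\n') (h2 : c ≠ '\r') (h3 : ¬ (c = ' ' ∨ c = '\t')) :
    PySem.Chars.isspace c = false := by
  have n1 : c.toNat ≠ 10 := fun h => h1 (pvChar_eq_of_toNat c '\n' h)
  have n2 : c.toNat ≠ 13 := fun h => h2 (pvChar_eq_of_toNat c '\r' h)
  have n3 : c.toNat ≠ 32 := fun h => h3 (Or.inl (pvChar_eq_of_toNat c ' ' h))
  have n4 : c.toNat ≠ 9 := fun h => h3 (Or.inr (pvChar_eq_of_toNat c '\t' h))
  simp [pvDomChar] at hdom
  simp [PySem.Chars.isspace]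
  omega

theorem pv_isspace_st (c : Char) (h : c = ' ' ∨ c = '\t') : PySem.Chars.isspace c = true := by
  rcases h with h | h <;> subst h <;> decide

theorem pv_rstrip_allspace (ws : List Char) (h : ∀ x ∈ ws, x = ' ' ∨ x = '\t') :
    PySem.Chars.rstrip ws = [] := by
  simp only [PySem.Chars.rstrip]
  have : ws.reverse.dropWhile PySem.Chars.isspace = [] := by
    apply List.dropWhile_eq_nil_iff.mpr
    intro x hx
    exact pv_isspace_st x (h x (List.mem_reverse.mp hx))
  simp [this]

theorem pv_rstrip_ws_cons (ws h : List Char) (c : Char) (hc : PySem.Chars.isspace c = false) :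
    PySem.Chars.rstrip (ws ++ c :: h) = ws ++ c :: PySem.Chars.rstrip h := by
  simp only [PySem.Chars.rstrip, List.reverse_append, List.reverse_cons]
  rw [show h.reverse ++ [c] ++ ws.reverse = (h.reverse ++ [c]) ++ ws.reverse by simp]
  rw [List.dropWhile_append, List.dropWhile_append]
  by_cases he : (h.reverse.dropWhile PySem.Chars.isspace).isEmpty
  · simp [hc, List.isEmpty_iff.mp he]
  · simp [he, hc]

-- the machine, line-level characterisation
theorem pvMGo_consHead (cs : List Char) (st : Bool) (nl : Nat) (ws out : List Char)
    (hdom : ∀ c ∈ cs, pvDomChar c = true) (hcr : '\r' ∉ cs)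
    (hws : ∀ x ∈ ws, x = ' ' ∨ x = '\t') :
    pvMGo cs st nl ws out
      = out ++ pvH st nl ((pvConsHead ws (pvSplit cs)).map PySem.Chars.rstrip) := by
  induction cs generalizing st nl ws out with
  | nil =>
      simp [pvMGo, pvSplit, pvConsHead, pvH, pv_rstrip_allspace ws hws]
  | cons c t ih =>
      have hdt : ∀ x ∈ t, pvDomChar x = true := fun x hx => hdom x (List.mem_cons_of_mem _ hx)
      have hct : '\r' ∉ t := fun hx => hcr (List.mem_cons_of_mem _ hx)
      obtain ⟨h, tl, hsp⟩ : ∃ h tl, pvSplit t = h :: tl := by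
        cases hq : pvSplit t with
        | nil => exact absurd hq (pvSplit_ne_nil t)
        | cons a b => exact ⟨a, b, rfl⟩
      by_cases hnl : c = '\n'
      · subst hnl
        rw [show pvMGo ('\n' :: t) st nl ws out = pvMGo t st (nl + 1) [] out by
          simp [pvMGo]]
        rw [ih st (nl + 1) [] out hdt hct (by simp)]
        simp [pvSplit, pvConsHead, hsp, pvH, pv_rstrip_allspace ws hws]
      · have hsplit : pvSplit (c :: t) = (c :: h) :: tl := by
          simp [pvSplit, hnl, hsp, pvConsHead]
        by_cases hst : c = ' ' ∨ c = '\t'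
        · rw [show pvMGo (c :: t) st nl ws out = pvMGo t st nl (ws ++ [c]) out by
            simp [pvMGo, hnl, hst]]
          rw [ih st nl (ws ++ [c]) out hdt hct (by
            intro x hx
            rcases List.mem_append.mp hx with hx | hx
            · exact hws x hx
            · simp at hx; subst hx; exact hst)]
          simp [hsplit, hsp, pvConsHead]
        · have hcr' : c ≠ '\r' := fun he => hcr (by simp [he])
          have hsp0 : PySem.Chars.isspace c = false :=
            pv_isspace_false c (hdom c (by simp)) hnl hcr' hst
          rw [show pvMGo (c :: t) st nl ws out
              = pvMGo t true 0 []
                  (out ++ (if st then List.replicate nl '\n' else []) ++ ws ++ [c]) by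
            simp [pvMGo, hnl, hst]]
          rw [ih true 0 [] _ hdt hct (by simp)]
          rw [hsplit]
          simp only [hsp, pvConsHead, List.map_cons, List.nil_append,
            pv_rstrip_ws_cons ws h c hsp0]
          have hne : ws ++ c :: PySem.Chars.rstrip h ≠ [] := by simp
          by_cases hrh : PySem.Chars.rstrip h = [] <;>
            simp [pvH, hne, hrh]

theorem pvH_true (rs : List (List Char)) : ∀ nl : Nat,
    pvH true nl rs
      = if pvTrimB rs = [] then [] else List.replicate nl '\n' ++ pvJoin (pvTrimB rs) := by
  induction rs with
  | nil => intro nl; simp [pvH, pvTrimB]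
  | cons r rs ih =>
      intro nl
      by_cases hr : r = []
      · subst hr
        cases hq : pvTrimB rs with
        | nil => simp [pvH, pvTrimB, hq, ih]
        | cons y t =>
            simp only [pvH, if_pos rfl, ih, hq, pvTrimB]
            simp [pvJoin, List.replicate_succ']
      · cases hq : pvTrimB rs with
        | nil =>
            simp only [pvH, if_neg hr, ih, hq, pvTrimB]
            simp [pvJoin, hr]
        | cons y t =>
            simp only [pvH, if_neg hr, ih, hq, pvTrimB]
            simp [pvJoin, hr, List.replicate_succ']

theorem pvH_false (rs : List (List Char)) : ∀ nl : Nat,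
    pvH false nl rs = pvJoin (pvTrimB (pvTrimF rs)) := by
  induction rs with
  | nil => intro nl; simp [pvH, pvTrimB, pvTrimF, pvJoin]
  | cons r rs ih =>
      intro nl
      by_cases hr : r = []
      · subst hr; simp [pvH, pvTrimF, ih]
      · rw [show pvH false nl (r :: rs) = r ++ pvH true 1 rs by simp [pvH, hr]]
        rw [pvH_true rs 1]
        cases hq : pvTrimB rs with
        | nil => simp [pvTrimF, pvTrimB, hr, hq, pvJoin]
        | cons y t => simp [pvTrimF, pvTrimB, hr, hq, pvJoin, List.replicate_succ]

theorem pvMGo_spec (cs : List Char)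
    (hdom : ∀ c ∈ cs, pvDomChar c = true) (hcr : '\r' ∉ cs) :
    pvMGo cs false 0 [] [] = pvJoin (pvTrimB (pvTrimF ((pvSplit cs).map PySem.Chars.rstrip))) := by
  rw [pvMGo_consHead cs false 0 [] [] hdom hcr (by simp)]
  obtain ⟨h, tl, hsp⟩ : ∃ h tl, pvSplit cs = h :: tl := by
    cases hq : pvSplit cs with
    | nil => exact absurd hq (pvSplit_ne_nil cs)
    | cons a b => exact ⟨a, b, rfl⟩
  rw [hsp]
  simp only [pvConsHead, List.nil_append, List.nil_append]
  exact pvH_false _ 0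

-- ===== A-side characterisation =====

theorem pvN1_cons (c : Char) (t : List Char) (h : ¬(c = '\r' ∧ ∃ t2, t = '\n' :: t2)) :
    pvN1 (c :: t) = c :: pvN1 t := by
  rw [pvN1.eq_def]
  split
  · rename_i heq
    simp at heq
  · rename_i t2 heq
    injection heq with h1 h2
    exact absurd ⟨h1, t2, h2⟩ h
  · rename_i c' t' hne heq
    injection heq with h1 h2
    rw [h1, h2]

theorem pvPrefix_cr (c : Char) (t : List Char) (h : ¬(c = '\r' ∧ ∃ t2, t = '\n' :: t2)) :
    List.isPrefixOf ['\r', '\n'] (c :: t) = false := by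
  cases t with
  | nil => simp [List.isPrefixOf]
  | cons d t2 =>
      simp [List.isPrefixOf]
      intro hc hd
      exact absurd ⟨hc.symm, t2, by rw [hd]⟩ h

theorem pvReplace_go1 : ∀ (fuel : Nat) (l acc : List Char), l.length ≤ fuel →
    PySem.Chars.replace.go ['\r', '\n'] ['\n'] fuel l acc = acc.reverse ++ pvN1 l := by
  intro fuel
  induction fuel with
  | zero =>
      intro l acc h
      have : l = [] := List.length_eq_zero_iff.mp (Nat.le_zero.mp h)
      subst this
      simp [PySem.Chars.replace.go, pvN1]
  | succ n ih =>
      intro l acc h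
      cases l with
      | nil => simp [PySem.Chars.replace.go, pvN1]
      | cons c t =>
          rw [PySem.Chars.replace.go.eq_def]
          by_cases hcrlf : c = '\r' ∧ ∃ t2, t = '\n' :: t2
          · obtain ⟨hc, t2, ht⟩ := hcrlf
            subst hc; subst ht
            have hp : List.isPrefixOf ['\r', '\n'] ('\r' :: '\n' :: t2) = true := by
              simp [List.isPrefixOf]
            simp only [hp, if_pos]
            rw [show List.drop (['\r', '\n'] : List Char).length ('\r' :: '\n' :: t2) = t2 by
              simp]
            rw [show (['\n'] : List Char).reverse ++ acc = '\n' :: acc by simp]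
            rw [ih t2 ('\n' :: acc) (by simp at h ⊢; omega)]
            simp [pvN1]
          · have hp := pvPrefix_cr c t hcrlf
            simp only [hp, Bool.false_eq_true, if_neg, not_false_eq_true]
            rw [ih t (c :: acc) (by simp at h ⊢; omega)]
            rw [pvN1_cons c t hcrlf]
            simp

theorem pvReplace_go2 : ∀ (fuel : Nat) (l acc : List Char), l.length ≤ fuel →
    PySem.Chars.replace.go ['\r'] ['\n'] fuel l acc = acc.reverse ++ pvN2 l := by
  intro fuel
  induction fuel with
  | zero =>
      intro l acc h
      have : l = [] := List.length_eq_zero_iff.mp (Nat.le_zero.mp h)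
      subst this
      simp [PySem.Chars.replace.go, pvN2]
  | succ n ih =>
      intro l acc h
      cases l with
      | nil => simp [PySem.Chars.replace.go, pvN2]
      | cons c t =>
          rw [PySem.Chars.replace.go.eq_def]
          by_cases hc : c = '\r'
          · subst hc
            have hp : List.isPrefixOf ['\r'] ('\r' :: t) = true := by
              simp [List.isPrefixOf]
            simp only [hp, if_pos]
            rw [show List.drop (['\r'] : List Char).length ('\r' :: t) = t by simp]
            rw [show (['\n'] : List Char).reverse ++ acc = '\n' :: acc by simp]
            rw [ih t ('\n' :: acc) (by simp at h ⊢; omega)]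
            simp [pvN2]
          · have hp : List.isPrefixOf ['\r'] (c :: t) = false := by
              simp [List.isPrefixOf]
              exact fun he => hc he.symm
            simp only [hp, Bool.false_eq_true, if_neg, not_false_eq_true]
            rw [ih t (c :: acc) (by simp at h ⊢; omega)]
            simp [pvN2, hc]

theorem pvN2_pvN1 (cs : List Char) : pvN2 (pvN1 cs) = pvNorm cs := by
  fun_induction pvNorm cs <;> simp_all [pvN1, pvN2]

theorem pvSplitOn_go : ∀ (fuel : Nat) (l cur : List Char) (acc : List (List Char)),
    l.length ≤ fuel →
    PySem.Chars.splitOn.go ['\n'] fuel l cur acc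
      = acc.reverse ++ pvConsHead cur.reverse (pvSplit l) := by
  intro fuel
  induction fuel with
  | zero =>
      intro l cur acc h
      have : l = [] := List.length_eq_zero_iff.mp (Nat.le_zero.mp h)
      subst this
      simp [PySem.Chars.splitOn.go, pvSplit, pvConsHead]
  | succ n ih =>
      intro l cur acc h
      cases l with
      | nil => simp [PySem.Chars.splitOn.go, pvSplit, pvConsHead]
      | cons c t =>
          rw [PySem.Chars.splitOn.go.eq_def]
          obtain ⟨hh, tl, hsp⟩ : ∃ hh tl, pvSplit t = hh :: tl := by
            cases hq : pvSplit t with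
            | nil => exact absurd hq (pvSplit_ne_nil t)
            | cons a b => exact ⟨a, b, rfl⟩
          by_cases hc : c = '\n'
          · subst hc
            have hp : List.isPrefixOf ['\n'] ('\n' :: t) = true := by
              simp [List.isPrefixOf]
            simp only [hp, if_pos]
            rw [show List.drop (['\n'] : List Char).length ('\n' :: t) = t by simp]
            rw [ih t [] (cur.reverse :: acc) (by simp at h ⊢; omega)]
            simp [pvSplit, pvConsHead, hsp]
          · have hp : List.isPrefixOf ['\n'] (c :: t) = false := by
              simp [List.isPrefixOf]
              exact fun he => hc he.symm
            simp only [hp, Bool.false_eq_true, if_neg, not_false_eq_true]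
            rw [ih t (c :: cur) acc (by simp at h ⊢; omega)]
            simp [pvSplit, pvConsHead, hsp, hc]

theorem pvSplitOn_eq (s : List Char) :
    PySem.Chars.splitOn s ['\n'] = pvSplit s := by
  rw [PySem.Chars.splitOn, pvSplitOn_go (s.length + 1) s [] [] (by omega)]
  obtain ⟨hh, tl, hsp⟩ : ∃ hh tl, pvSplit s = hh :: tl := by
    cases hq : pvSplit s with
    | nil => exact absurd hq (pvSplit_ne_nil s)
    | cons a b => exact ⟨a, b, rfl⟩
  simp [hsp, pvConsHead]

theorem pvReplace1 (s : List Char) :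
    PySem.Chars.replace s ['\r', '\n'] ['\n'] = pvN1 s := by
  rw [PySem.Chars.replace]
  simp only [List.isEmpty_cons, Bool.false_eq_true, if_neg, not_false_eq_true]
  exact (pvReplace_go1 s.length s [] (le_refl _)).trans (by simp)

theorem pvReplace2 (s : List Char) :
    PySem.Chars.replace s ['\r'] ['\n'] = pvN2 s := by
  rw [PySem.Chars.replace]
  simp only [List.isEmpty_cons, Bool.false_eq_true, if_neg, not_false_eq_true]
  exact (pvReplace_go2 s.length s [] (le_refl _)).trans (by simp)

theorem pvTrimFront_map (ls : List String) :
    (pvTrimFront ls).map String.toList = pvTrimF (ls.map String.toList) := by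
  induction ls with
  | nil => simp [pvTrimFront, pvTrimF]
  | cons l ls ih =>
      by_cases hl : l = ""
      · subst hl; simp [pvTrimFront, pvTrimF, ih]
      · have : l.toList ≠ [] := by
          intro hc
          exact hl (String.toList_inj.mp (by simp [hc]))
        simp [pvTrimFront, pvTrimF, hl, this]

theorem pvTrimBack_append (ls : List String) (x : String) :
    pvTrimBack (ls ++ [x]) = if x = "" then pvTrimBack ls else ls ++ [x] := by
  rw [pvTrimBack.eq_def]
  by_cases hx : x = ""
  · simp [hx]
  · simp [hx]

theorem pvTrimB_append (rs : List (List Char)) (r : List Char) :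
    pvTrimB (rs ++ [r]) = if r = [] then pvTrimB rs else rs ++ [r] := by
  induction rs with
  | nil => by_cases hr : r = [] <;> simp [pvTrimB, hr]
  | cons a rs ih =>
      by_cases hr : r = []
      · subst hr
        simp [pvTrimB, ih]
      · have hne : rs ++ [r] ≠ [] := by simp
        simp only [List.cons_append, pvTrimB, ih, if_neg hr]

theorem pvTrimBack_map (ls : List String) :
    (pvTrimBack ls).map String.toList = pvTrimB (ls.map String.toList) := by
  induction ls using List.reverseRecOn with
  | nil => rw [pvTrimBack.eq_def]; simp [pvTrimB]
  | append_singleton ls x ih =>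
      rw [pvTrimBack_append, List.map_append, List.map_singleton, pvTrimB_append]
      by_cases hx : x = ""
      · simp [hx, ih]
      · have : x.toList ≠ [] := by
          intro hc
          exact hx (String.toList_inj.mp (by simp [hc]))
        simp [hx, this]

theorem pvJoin_eq (ls : List (List Char)) :
    PySem.Chars.join ['\n'] ls = pvJoin ls := by
  rw [PySem.Chars.join]
  induction ls with
  | nil => simp [pvJoin, List.intercalate]
  | cons x ls ih =>
      cases ls with
      | nil => simp [pvJoin, List.intercalate, List.intersperse]
      | cons y t =>
          rw [show List.intercalate ['\n'] (x :: y :: t)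
              = x ++ ['\n'] ++ List.intercalate ['\n'] (y :: t) by
            simp [List.intercalate, List.intersperse]]
          simp [pvJoin, ih]

theorem pvSplitLines (s : String) :
    (((PySem.Str.split? s "\n").getD []).map PySem.Str.rstrip).map String.toList
      = (pvSplit s.toList).map PySem.Chars.rstrip := by
  have h := PySem.Str.split?_map s "\n"
  rw [show ("\n" : String).toList = ['\n'] by decide] at h
  rw [PySem.Chars.split?] at h
  simp only [List.isEmpty_cons, Bool.false_eq_true, if_neg, not_false_eq_true] at h
  cases hq : PySem.Str.split? s "\n" with
  | none => rw [hq] at h; simp at h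
  | some ls =>
      rw [hq] at h
      simp only [Option.map_some, Option.some.injEq] at h
      simp only [Option.getD_some, List.map_map]
      rw [show (String.toList ∘ PySem.Str.rstrip) = (PySem.Chars.rstrip ∘ String.toList) by
        funext z; simp [PySem.Str.toList_rstrip]]
      rw [← List.map_map, h, pvSplitOn_eq]

theorem pvA_chars (text : String) (h : text ≠ "") :
    (normalize_text_for_compare_py text).toList
      = pvJoin (pvTrimB (pvTrimF ((pvSplit (pvNorm text.toList)).map PySem.Chars.rstrip))) := by
  rw [normalize_text_for_compare_py]
  simp only [h, if_neg, not_false_eq_true]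
  rw [PySem.Str.toList_join]
  have hnorm : (PySem.Str.replace (PySem.Str.replace text "\r\n" "\n") "\r" "\n").toList
      = pvNorm text.toList := by
    rw [PySem.Str.toList_replace, PySem.Str.toList_replace]
    rw [show ("\r\n" : String).toList = ['\r', '\n'] by decide,
        show ("\r" : String).toList = ['\r'] by decide,
        show ("\n" : String).toList = ['\n'] by decide]
    rw [pvReplace1, pvReplace2, pvN2_pvN1]
  rw [show ("\n" : String).toList = ['\n'] by decide]
  rw [pvJoin_eq, pvTrimBack_map, pvTrimFront_map, pvSplitLines, hnorm]

theorem pvNorm_dom (cs : List Char) (hdom : ∀ c ∈ cs, pvDomChar c = true) :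
    ∀ c ∈ pvNorm cs, pvDomChar c = true := by
  fun_induction pvNorm cs <;> simp_all
  all_goals decide

theorem pvNorm_no_cr (cs : List Char) : '\r' ∉ pvNorm cs := by
  fun_induction pvNorm cs with
  | case1 => simp
  | case2 t ih => simpa using ih
  | case3 t hne ih => simpa using ih
  | case4 c t h1 h2 ih =>
      simp only [List.mem_cons]
      rintro (he | he)
      · exact h2 he.symm
      · exact ih he

-- ===== VERDICT (by name: the statement is the Claim_ definition above) =====
theorem normalize_text_for_compare_py_spec : Claim_equal_normalize_text_for_compare_py := by
  intro text hdom
  unfold Spec_normalize_text_for_compare_py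
  by_cases ht : text = ""
  · subst ht; rfl
  · apply String.toList_inj.mp
    rw [pvA_chars text ht]
    rw [show (normalize_text_for_compare_py_alt text).toList = pvBGo text.toList false 0 [] [] by
      simp [normalize_text_for_compare_py_alt]]
    rw [pvBGo_eq_pvMGo_pvNorm]
    have hd : ∀ c ∈ text.toList, pvDomChar c = true := by
      intro c hc
      exact List.all_eq_true.mp hdom c hc
    rw [pvMGo_spec (pvNorm text.toList) (pvNorm_dom text.toList hd) (pvNorm_no_cr text.toList)]
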